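-- pv_equiv track=rewrite | github.com/Chapman808/pywordle | gameplay/util.py | evaluatedGuess
-- ===== SOURCE A (Python) =====
-- def evaluatedGuess(guessInput, solution):
--     letterList = [str(char) for char in guessInput]
--     matched = set()
--     for i, letter in enumerate(letterList):
--         if letter in matched:
--             letterList[i] = '_' + letter
--         elif letter == solution[i]:
--             letterList[i] = '*' + letter
--             matched.add(letter)
--         elif letter in set(solution):
--             letterList[i] = '+' + letter
--             matched.add(letter)
--         else: letterList[i] = "_" + letter
--     return letterList
-- ===== SOURCE B (Python) =====
-- def evaluatedGuess(guessInput, solution):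
--     first = {}
--     for i, c in enumerate(guessInput):
--         first.setdefault(c, i)
--     solutionLetters = set(solution)
--     return [(('*' if c == solution[i] else '+') + c)
--             if c in solutionLetters and first[c] == i
--             else '_' + c
--             for i, c in enumerate(guessInput)]
-- ===== Notes on version B (the rewrite author's own statement) =====
-- stated objective: alternative
-- what changed: B replaces A's running 'matched' set and per-iteration set(solution) rebuild with two staged passes: it first builds a first-occurrence index dict over the guess (setdefault) and the solution letter set once, then classifies every position statelessly via 'c in solutionLetters and first[c] == i' in a comprehension; A instead mutates letterList in place under a mutable set carried through the loop.
import Mathlib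
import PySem

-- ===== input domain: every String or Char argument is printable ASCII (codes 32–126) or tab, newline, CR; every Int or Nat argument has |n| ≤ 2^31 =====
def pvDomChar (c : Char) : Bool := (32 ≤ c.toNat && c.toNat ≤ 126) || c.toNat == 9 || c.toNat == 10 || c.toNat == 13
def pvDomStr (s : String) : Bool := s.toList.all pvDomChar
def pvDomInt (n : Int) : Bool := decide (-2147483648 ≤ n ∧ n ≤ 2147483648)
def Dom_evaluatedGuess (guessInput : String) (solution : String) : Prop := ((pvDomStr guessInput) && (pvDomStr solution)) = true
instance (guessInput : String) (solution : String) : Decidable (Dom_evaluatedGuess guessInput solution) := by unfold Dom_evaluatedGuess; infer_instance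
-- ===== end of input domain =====

-- B replaces A's running 'matched' set (and per-iteration set(solution) rebuild) with two staged
-- passes: a first-occurrence dict over the guess built once, then a stateless comprehension;
-- same value wherever A returns (Pre_ excludes exactly A's IndexError inputs).

-- ===== PORT A =====
-- loop over the letters with the running index i and the 'matched' set, as in A
def evaluatedGuessLoop (sl : List Char) : List Char → Nat → PySem.Set Char → List String
  | [], _, _ => []
  | c :: rest, i, matched =>
    if PySem.Set.contains matched c then
      ("_".push c) :: evaluatedGuessLoop sl rest (i + 1) matched
    else
      match PySem.List.pyGet? sl (i : Int) with
      | none => ("_".push c) :: evaluatedGuessLoop sl rest (i + 1) matched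
          -- Python raises IndexError here; these inputs are excluded by Pre_
      | some sc =>
        if c == sc then
          ("*".push c) :: evaluatedGuessLoop sl rest (i + 1) (PySem.Set.add matched c)
        else if PySem.Set.contains (PySem.Set.ofList sl) c then
          ("+".push c) :: evaluatedGuessLoop sl rest (i + 1) (PySem.Set.add matched c)
        else
          ("_".push c) :: evaluatedGuessLoop sl rest (i + 1) matched

def evaluatedGuess (guessInput : String) (solution : String) : List String :=
  evaluatedGuessLoop solution.toList guessInput.toList 0 PySem.Set.empty

-- ===== PORT B =====
-- B's first pass: dict from each guess letter to the index of its first occurrence (setdefault loop)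
def evaluatedGuessFirst (gl : List Char) : PySem.Dict Char Int :=
  (PySem.List.enumerate gl 0).foldl (fun d p => PySem.Dict.setdefault d p.2 p.1) PySem.Dict.empty

-- B's second pass, per position (i, c); 'first[c]' is total here since c ∈ gl, so getD is exact
def evaluatedGuessAltBody (sl : List Char) (first : PySem.Dict Char Int) (p : Int × Char) : String :=
  if PySem.Set.contains (PySem.Set.ofList sl) p.2 && (PySem.Dict.getD first p.2 0 == p.1) then
    match PySem.List.pyGet? sl p.1 with
    | some sc => if p.2 == sc then "*".push p.2 else "+".push p.2
    | none => "_".push p.2   -- Python raises IndexError here; excluded by Pre_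
  else "_".push p.2

def evaluatedGuess_alt (guessInput : String) (solution : String) : List String :=
  (PySem.List.enumerate guessInput.toList 0).map
    (evaluatedGuessAltBody solution.toList (evaluatedGuessFirst guessInput.toList))

-- ===== PRECONDITION & SPEC =====
-- Pre_ is exactly the inputs where A returns: every guess position at or past the end of the
-- solution must repeat an earlier guess letter that occurs in the solution (else A's
-- 'solution[i]' raises IndexError).
def Pre_evaluatedGuess (guessInput : String) (solution : String) : Prop :=
  ∀ i : Nat, i < guessInput.toList.length → solution.toList.length ≤ i →
    guessInput.toList[i]! ∈ solution.toList ∧ guessInput.toList[i]! ∈ guessInput.toList.take i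

instance (guessInput : String) (solution : String) : Decidable (Pre_evaluatedGuess guessInput solution) := by
  unfold Pre_evaluatedGuess; infer_instance

def pvWitness_evaluatedGuess : String × String := ("crane", "crate")

def Spec_evaluatedGuess (guessInput : String) (solution : String) (out : List String) : Prop := out = evaluatedGuess_alt guessInput solution
instance (guessInput : String) (solution : String) (out : List String) : Decidable (Spec_evaluatedGuess guessInput solution out) := by unfold Spec_evaluatedGuess; infer_instance

-- ===== CLAIM (what is proved, stated in full; the proofs are below) =====
def Claim_equal_evaluatedGuess : Prop := ∀ (guessInput : String) (solution : String), Dom_evaluatedGuess guessInput solution → Pre_evaluatedGuess guessInput solution → Spec_evaluatedGuess guessInput solution (evaluatedGuess guessInput solution)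

-- ===== LEMMAS AND PROOFS =====

-- one setdefault step keeps an existing binding of c unchanged
theorem sd_some (d : PySem.Dict Char Int) (a c : Char) (k v : Int) (h : PySem.Dict.get? d c = some v) :
    PySem.Dict.get? (PySem.Dict.setdefault d a k) c = some v := by
  by_cases hc : PySem.Dict.contains d a = true
  · rw [PySem.Dict.setdefault_of_contains d k hc]; exact h
  · rw [PySem.Dict.setdefault_of_not_contains d k (by simpa using hc)]
    by_cases hac : c = a
    · subst hac; rw [PySem.Dict.contains_eq_isSome_get?, h] at hc; simp at hc
    · rw [PySem.Dict.get?_insert_of_ne d k hac]; exact h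

-- one setdefault step on a different key keeps c unbound
theorem sd_none (d : PySem.Dict Char Int) (a c : Char) (k : Int) (hac : c ≠ a)
    (h : PySem.Dict.get? d c = none) :
    PySem.Dict.get? (PySem.Dict.setdefault d a k) c = none := by
  by_cases hc : PySem.Dict.contains d a = true
  · rw [PySem.Dict.setdefault_of_contains d k hc]; exact h
  · rw [PySem.Dict.setdefault_of_not_contains d k (by simpa using hc)]
    rw [PySem.Dict.get?_insert_of_ne d k hac]; exact h

-- one setdefault step binds a fresh key to the current index
theorem sd_fresh (d : PySem.Dict Char Int) (c : Char) (k : Int)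
    (h : PySem.Dict.get? d c = none) :
    PySem.Dict.get? (PySem.Dict.setdefault d c k) c = some k := by
  rw [PySem.Dict.setdefault_of_not_contains d k
    (by rw [PySem.Dict.contains_eq_isSome_get?, h]; rfl)]
  exact PySem.Dict.get?_insert_self d c k

-- a key already bound stays bound to the same value through the setdefault loop
theorem first_get_some (c : Char) (v : Int) :
    ∀ (l : List Char) (k : Int) (d : PySem.Dict Char Int), PySem.Dict.get? d c = some v →
      PySem.Dict.get? ((PySem.List.enumerate l k).foldl
        (fun d p => PySem.Dict.setdefault d p.2 p.1) d) c = some v := by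
  intro l
  induction l with
  | nil => intro k d h; simpa [PySem.List.enumerate_nil] using h
  | cons a l ih =>
    intro k d h
    rw [PySem.List.enumerate_cons, List.foldl_cons]
    exact ih (k + 1) _ (sd_some d a c k v h)

-- when c is NOT in 'done', the loop binds c to the index right after 'done'
theorem first_get_of_not_mem (c : Char) (rest : List Char) :
    ∀ (done : List Char) (k : Int) (d : PySem.Dict Char Int),
      c ∉ done → PySem.Dict.get? d c = none →
      PySem.Dict.get? ((PySem.List.enumerate (done ++ c :: rest) k).foldl
        (fun d p => PySem.Dict.setdefault d p.2 p.1) d) c = some (k + done.length) := by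
  intro done
  induction done with
  | nil =>
    intro k d _ hd
    rw [List.nil_append, PySem.List.enumerate_cons, List.foldl_cons]
    simpa using first_get_some c k rest (k + 1) _ (sd_fresh d c k hd)
  | cons a done ih =>
    intro k d hm hd
    rw [List.cons_append, PySem.List.enumerate_cons, List.foldl_cons]
    have hac : c ≠ a := fun h => hm (h ▸ List.mem_cons_self)
    have h := ih (k + 1) (PySem.Dict.setdefault d a k)
      (fun h => hm (List.mem_cons_of_mem _ h)) (sd_none d a c k hac hd)
    rw [show (k + ((a :: done).length : Int)) = (k + 1) + (done.length : Int) by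
      simp only [List.length_cons]; push_cast; omega]
    exact h

-- when c IS in 'done', the loop binds c to some strictly earlier index
theorem first_get_of_mem (c : Char) :
    ∀ (done : List Char) (rest : List Char) (k : Int) (d : PySem.Dict Char Int),
      c ∈ done → PySem.Dict.get? d c = none →
      ∃ j : Int, PySem.Dict.get? ((PySem.List.enumerate (done ++ rest) k).foldl
        (fun d p => PySem.Dict.setdefault d p.2 p.1) d) c = some j ∧ j < k + done.length := by
  intro done
  induction done with
  | nil => intro _ _ _ hm _; exact absurd hm (List.not_mem_nil)
  | cons a done ih =>
    intro rest k d hm hd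
    rw [List.cons_append, PySem.List.enumerate_cons, List.foldl_cons]
    by_cases hac : a = c
    · subst hac
      refine ⟨k, first_get_some a k _ (k + 1) _ (sd_fresh d a k hd), ?_⟩
      simp only [List.length_cons]
      push_cast
      omega
    · have hm' : c ∈ done := by
        rcases List.mem_cons.mp hm with h | h
        · exact absurd h.symm hac
        · exact h
      obtain ⟨j, hj, hjlt⟩ :=
        ih rest (k + 1) _ hm' (sd_none d a c k (fun h => hac h.symm) hd)
      refine ⟨j, hj, ?_⟩
      simp only [List.length_cons] at *
      push_cast at hjlt ⊢
      omega

-- the value of B's first-occurrence lookup at position done.length, by membership in 'done'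
theorem firstDict_getD (gl done rest : List Char) (c : Char) (hgl : done ++ c :: rest = gl) :
    (PySem.Dict.getD (evaluatedGuessFirst gl) c 0 == ((done.length : Nat) : Int))
      = decide (c ∉ done) := by
  unfold evaluatedGuessFirst
  by_cases hm : c ∈ done
  · obtain ⟨j, hj, hjlt⟩ := first_get_of_mem c done (c :: rest) 0 PySem.Dict.empty hm
      (PySem.Dict.get?_empty c)
    rw [← hgl, PySem.Dict.getD_eq_get?_getD, hj]
    simp only [Option.getD_some]
    have : j ≠ (done.length : Int) := by omega
    simp [hm, this]
  · have h := first_get_of_not_mem c rest done 0 PySem.Dict.empty hm (PySem.Dict.get?_empty c)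
    rw [← hgl, PySem.Dict.getD_eq_get?_getD, h]
    simp [hm]

-- invariant maintenance when A's matched set is left unchanged
theorem inv_keep (sl done : List Char) (M : PySem.Set Char) (c : Char)
    (hM : ∀ d : Char, d ∈ M ↔ d ∈ sl ∧ d ∈ done)
    (hc : c ∈ M ↔ c ∈ sl) :
    ∀ d : Char, d ∈ M ↔ d ∈ sl ∧ d ∈ done ++ [c] := by
  intro d
  by_cases h : d = c
  · subst h; rw [hc]; simp
  · rw [hM d]; simp [h]

-- invariant maintenance when A adds the letter to matched ('*' and '+' branches)
theorem inv_add (sl done : List Char) (M : PySem.Set Char) (c : Char)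
    (hM : ∀ d : Char, d ∈ M ↔ d ∈ sl ∧ d ∈ done)
    (hnm : c ∉ M) (hc : c ∈ sl) :
    ∀ d : Char, d ∈ PySem.Set.add M c ↔ d ∈ sl ∧ d ∈ done ++ [c] := by
  have hadd : PySem.Set.add M c = M ++ [c] := by
    unfold PySem.Set.add
    rw [if_neg (by simpa using hnm)]
  intro d
  rw [hadd]
  by_cases h : d = c
  · subst h; simp [hc]
  · simp [h, hM d]

-- main loop invariant: after processing 'done', A's matched set contains exactly the letters of
-- 'done' that occur in the solution; then A's loop on the suffix equals B's map over the suffix.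
theorem evaluatedGuess_loop_eq (sl gl : List Char)
    (hpre : ∀ i : Nat, i < gl.length → sl.length ≤ i → gl[i]! ∈ sl ∧ gl[i]! ∈ gl.take i)
    (rest : List Char) :
    ∀ (done : List Char) (M : PySem.Set Char),
      done ++ rest = gl →
      (∀ d : Char, d ∈ M ↔ d ∈ sl ∧ d ∈ done) →
      evaluatedGuessLoop sl rest done.length M
        = (PySem.List.enumerate rest (done.length : Int)).map
            (evaluatedGuessAltBody sl (evaluatedGuessFirst gl)) := by
  induction rest with
  | nil => intro done M _ _; simp [evaluatedGuessLoop, PySem.List.enumerate_nil]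
  | cons c rest ih =>
    intro done M hgl hM
    have htake : gl.take done.length = done := by
      rw [← hgl]; exact List.take_left
    have hbody : evaluatedGuessAltBody sl (evaluatedGuessFirst gl) ((done.length : Int), c)
        = (if c ∈ sl ∧ c ∉ done then
            (match PySem.List.pyGet? sl ((done.length : Int)) with
              | some sc => if c == sc then "*".push c else "+".push c
              | none => "_".push c)
          else "_".push c) := by
      unfold evaluatedGuessAltBody
      simp only [firstDict_getD gl done rest c hgl]
      by_cases h1 : c ∈ sl <;> by_cases h2 : c ∈ done <;> simp [h1, h2]
    have hstep : ∀ (M' : PySem.Set Char),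
        (∀ d : Char, d ∈ M' ↔ d ∈ sl ∧ d ∈ done ++ [c]) →
        evaluatedGuessLoop sl rest (done.length + 1) M'
          = (PySem.List.enumerate rest ((done.length : Int) + 1)).map
              (evaluatedGuessAltBody sl (evaluatedGuessFirst gl)) := by
      intro M' hM'
      have h := ih (done ++ [c]) M' (by simpa using hgl) hM'
      simp only [List.length_append, List.length_cons, List.length_nil] at h
      rw [show done.length + 1 = done.length + 0 + 1 by omega] at h ⊢
      rw [h]
      norm_num
    rw [PySem.List.enumerate_cons, List.map_cons, hbody]
    unfold evaluatedGuessLoop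
    by_cases hm : c ∈ M
    · -- letter already matched: '_' on both sides, set unchanged
      obtain ⟨hs, hd⟩ := (hM c).mp hm
      rw [if_pos (by simpa using hm), if_neg (by simp [hd])]
      rw [hstep M (inv_keep sl done M c hM ⟨fun _ => hs, fun _ => hm⟩)]
    · -- not yet matched
      rw [if_neg (by simpa using hm)]
      match hget : PySem.List.pyGet? sl ((done.length : Int)) with
      | none =>
        -- Python A raises here; Pre_ rules this case out
        exfalso
        have hlen : ¬ PySem.Raise.InRange sl.length ((done.length : Int)) :=
          (PySem.List.pyGet?_eq_none_iff _ _).mp hget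
        have hsl : sl.length ≤ done.length := by
          unfold PySem.Raise.InRange at hlen
          omega
        have hi : done.length < gl.length := by rw [← hgl]; simp
        have hcc : gl[done.length]! = c := by
          rw [← hgl]; simp
        obtain ⟨h1, h2⟩ := hpre done.length hi hsl
        rw [hcc] at h1 h2; rw [htake] at h2
        exact hm ((hM c).mpr ⟨h1, h2⟩)
      | some sc =>
        dsimp only
        have hscmem : sc ∈ sl := PySem.List.mem_of_pyGet?_eq_some sl hget
        by_cases heq : c = sc
        · -- '*' branch
          have hs : c ∈ sl := heq ▸ hscmem
          have hd : c ∉ done := fun hd => hm ((hM c).mpr ⟨hs, hd⟩)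
          rw [if_pos (beq_iff_eq.mpr heq), if_pos ⟨hs, hd⟩, if_pos (beq_iff_eq.mpr heq)]
          rw [hstep (PySem.Set.add M c) (inv_add sl done M c hM hm hs)]
        · by_cases hs : c ∈ sl
          · -- '+' branch
            have hd : c ∉ done := fun hd => hm ((hM c).mpr ⟨hs, hd⟩)
            have hbeq : (c == sc) = false := by simpa using heq
            rw [if_neg (by simp [hbeq]), if_pos (by simpa using hs), if_pos ⟨hs, hd⟩,
              if_neg (by simp [hbeq])]
            rw [hstep (PySem.Set.add M c) (inv_add sl done M c hM hm hs)]
          · -- final '_' branch: letter not in solution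
            have hbeq : (c == sc) = false := by simpa using heq
            rw [if_neg (by simp [hbeq]), if_neg (by simpa using hs), if_neg (by simp [hs])]
            rw [hstep M (inv_keep sl done M c hM ⟨fun h => absurd ((hM c).mp h).1 hs,
              fun h => absurd h hs⟩)]

-- ===== VERDICT (by name: the statement is the Claim_ definition above) =====
theorem evaluatedGuess_spec : Claim_equal_evaluatedGuess := by
  intro g s _ hpre
  unfold Spec_evaluatedGuess evaluatedGuess evaluatedGuess_alt
  have h := evaluatedGuess_loop_eq s.toList g.toList hpre g.toList [] PySem.Set.empty rfl
    (by intro d; simp [PySem.Set.empty])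
  simpa using h
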